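-- pv_equiv track=rewrite | github.com/LUCIT-Systems-and-Development/lucit-licensing-python | lucit_licensing_python/manager.py | __order_params
-- ===== SOURCE A (Python) =====
-- from operator import itemgetter
--
-- def __order_params(data: dict = None) -> list:
--     has_signature: bool = False
--     params = []
--     for key, value in data.items():
--         if key == 'signature':
--             has_signature = True
--         else:
--             params.append((key, value))
--     params.sort(key=itemgetter(0))
--     if has_signature:
--         params.append(('signature', data['signature']))
--     return params
-- ===== SOURCE B (Python) =====
-- def __order_params(data: dict = None) -> list:
--     return sorted(data.items(), key=lambda kv: (kv[0] == 'signature', kv[0]))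
-- ===== Notes on version B (the rewrite author's own statement) =====
-- stated objective: idiomatic
-- what changed: Replaces the flag-plus-accumulator loop, separate sort and conditional re-append of the signature value by a single sorted() call over all items with the composite key (key == 'signature', key), which puts every non-signature pair first in alphabetical order and the signature pair last.
import Mathlib
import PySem

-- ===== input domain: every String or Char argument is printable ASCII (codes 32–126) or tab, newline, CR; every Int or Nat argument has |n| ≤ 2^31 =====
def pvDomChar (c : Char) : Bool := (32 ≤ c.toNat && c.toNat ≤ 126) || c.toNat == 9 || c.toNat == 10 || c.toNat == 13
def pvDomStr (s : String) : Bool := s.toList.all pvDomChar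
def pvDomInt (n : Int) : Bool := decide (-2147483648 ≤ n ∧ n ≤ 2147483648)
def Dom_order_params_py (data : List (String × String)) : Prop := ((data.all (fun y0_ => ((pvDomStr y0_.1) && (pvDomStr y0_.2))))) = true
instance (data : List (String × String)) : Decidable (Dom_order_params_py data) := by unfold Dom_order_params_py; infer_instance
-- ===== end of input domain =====

-- B replaces A's separate-flag-sort-append loop by one sort under the composite key
-- (is-signature, key); equivalence is about the RETURN value (neither side mutates).

-- ===== PORT A =====
def order_params_py (data : List (String × String)) : List (String × String) :=
  -- has_signature/params loop
  let st := data.foldl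
    (fun (st : Bool × List (String × String)) kv =>
      if kv.1 == "signature" then (true, st.2) else (st.1, st.2 ++ [kv]))
    (false, [])
  -- params.sort(key=itemgetter(0)) — stable sort by first component
  let params := PySem.List.sorted st.2 (fun kv => kv.1) false
  if st.1 then
    -- data['signature'] is first-match dict lookup; the branch runs only when the key exists
    match data.find? (fun kv => kv.1 == "signature") with
    | some kv => params ++ [("signature", kv.2)]
    | none => params
  else params

-- ===== PORT B =====
def order_params_py_alt (data : List (String × String)) : List (String × String) :=
  -- sorted(data.items(), key=lambda kv: (kv[0] == 'signature', kv[0])) — Python tuple order = lex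
  PySem.List.sorted data (fun kv => toLex ((kv.1 == "signature"), kv.1)) false

-- ===== PRECONDITION & SPEC =====
-- Pre_ only states that the association list encodes a Python dict: keys are distinct
-- (duplicate-key lists are unreachable from Python, whose argument is a dict).
def Pre_order_params_py (data : List (String × String)) : Prop :=
  (data.map Prod.fst).Nodup
instance (data : List (String × String)) : Decidable (Pre_order_params_py data) := by
  unfold Pre_order_params_py; infer_instance
def pvWitness_order_params_py : (List (String × String)) :=
  [("b", "1"), ("signature", "s"), ("a", "2")]
def Spec_order_params_py (data : List (String × String)) (out : List (String × String)) : Prop := out = order_params_py_alt data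
instance (data : List (String × String)) (out : List (String × String)) : Decidable (Spec_order_params_py data out) := by unfold Spec_order_params_py; infer_instance

-- ===== CLAIM (what is proved, stated in full; the proofs are below) =====
def Claim_equal_order_params_py : Prop := ∀ (data : List (String × String)), Dom_order_params_py data → Pre_order_params_py data → Spec_order_params_py data (order_params_py data)

-- ===== LEMMAS AND PROOFS =====

-- the A-side loop computes (any signature, the non-signature pairs in order)
theorem order_params_loop_char (data : List (String × String))
    (b : Bool) (acc : List (String × String)) :
    data.foldl
      (fun (st : Bool × List (String × String)) kv =>
        if kv.1 == "signature" then (true, st.2) else (st.1, st.2 ++ [kv]))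
      (b, acc)
    = (b || data.any (fun kv => kv.1 == "signature"),
       acc ++ data.filter (fun kv => !(kv.1 == "signature"))) := by
  induction data generalizing b acc with
  | nil => simp
  | cons kv rest ih =>
    simp only [List.foldl_cons]
    by_cases h : (kv.1 == "signature") = true
    · rw [if_pos h, ih]
      simp [h]
    · rw [if_neg h, ih]
      simp [h]

-- with distinct keys there is exactly one pair whose key is 'signature', the one find? returns
theorem sig_filter_eq (data : List (String × String)) (kv0 : String × String)
    (hnd : (data.map Prod.fst).Nodup)
    (hfind : data.find? (fun kv => kv.1 == "signature") = some kv0) :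
    data.filter (fun kv => kv.1 == "signature") = [kv0] := by
  induction data with
  | nil => simp at hfind
  | cons x xs ih =>
    simp only [List.map_cons, List.nodup_cons] at hnd
    by_cases h : (x.1 == "signature") = true
    · rw [List.find?_cons_of_pos (p := fun kv : String × String => kv.1 == "signature") h] at hfind
      injection hfind with hkv
      subst hkv
      rw [List.filter_cons_of_pos (p := fun kv : String × String => kv.1 == "signature") h]
      have hx1 : x.1 = "signature" := by simpa using h
      have hnil : xs.filter (fun kv => kv.1 == "signature") = [] := by
        rw [List.filter_eq_nil_iff]
        intro a ha hpa
        have ha1 : a.1 = "signature" := by simpa using hpa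
        exact hnd.1 (by rw [hx1, ← ha1]; exact List.mem_map_of_mem ha)
      simp [hnil]
    · rw [List.find?_cons_of_neg (p := fun kv : String × String => kv.1 == "signature") h] at hfind
      rw [List.filter_cons_of_neg (p := fun kv : String × String => kv.1 == "signature") h]
      exact ih hnd.2 hfind

-- a by-first-component sort of a list with distinct first components is STRICTLY increasing
theorem sorted_fst_pairwise_lt (xs : List (String × String))
    (hnd : (xs.map Prod.fst).Nodup) :
    (PySem.List.sorted xs (fun kv => kv.1) false).Pairwise (fun a b => a.1 < b.1) := by
  have hperm := PySem.List.sorted_perm xs (fun kv => kv.1) false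
  have hle := PySem.List.sorted_pairwise xs (fun kv => kv.1)
  have hnd' : ((PySem.List.sorted xs (fun kv => kv.1) false).map Prod.fst).Nodup :=
    ((hperm.map Prod.fst).symm).nodup hnd
  have hne := List.pairwise_map.mp hnd'
  exact (hle.and hne).imp (fun h => lt_of_le_of_ne h.1 h.2)

theorem order_params_py_spec : Claim_equal_order_params_py := by
  intro data _ hpre
  unfold Spec_order_params_py order_params_py order_params_py_alt
  rw [order_params_loop_char]
  simp only [Bool.false_or, List.nil_append]
  have hndf : ((data.filter (fun kv => !(kv.1 == "signature"))).map Prod.fst).Nodup :=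
    ((List.filter_sublist).map Prod.fst).nodup hpre
  have hltF := sorted_fst_pairwise_lt _ hndf
  have hpermF := PySem.List.sorted_perm (data.filter (fun kv => !(kv.1 == "signature")))
      (fun kv => kv.1) false
  have hmemF : ∀ a ∈ PySem.List.sorted (data.filter (fun kv => !(kv.1 == "signature")))
      (fun kv => kv.1) false, (a.1 == "signature") = false := by
    intro a ha
    have := hpermF.mem_iff.mp ha
    have := List.of_mem_filter this
    simpa using this
  by_cases hany : (data.any fun kv => kv.1 == "signature") = true
  · obtain ⟨kv0, hfind⟩ : ∃ kv0, data.find? (fun kv => kv.1 == "signature") = some kv0 := by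
      rcases List.any_eq_true.mp hany with ⟨x, hx, hpx⟩
      exact Option.isSome_iff_exists.mp (List.find?_isSome.mpr ⟨x, hx, hpx⟩)
    have hx1 : kv0.1 = "signature" := by simpa using List.find?_some hfind
    have hkv0 : (("signature", kv0.2) : String × String) = kv0 := by
      rw [← hx1]
    rw [hany, hfind]
    simp only [if_true]
    rw [hkv0]
    refine (PySem.List.sorted_eq_of_perm_of_pairwise_lt data _
      (fun kv => toLex ((kv.1 == "signature"), kv.1)) ?_ ?_).symm
    · -- permutation
      have h1 : (data.filter (fun kv => kv.1 == "signature")) = [kv0] :=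
        sig_filter_eq data kv0 hpre hfind
      have h2 : (data.filter (fun kv => !(kv.1 == "signature"))
          ++ data.filter (fun kv => kv.1 == "signature")).Perm data :=
        (List.perm_append_comm).trans
          (List.filter_append_perm (fun kv : String × String => kv.1 == "signature") data)
      refine (hpermF.append (List.Perm.refl [kv0])).trans ?_
      rw [← h1]
      exact h2
    · rw [List.pairwise_append]
      refine ⟨?_, List.pairwise_singleton _ _, ?_⟩
      · refine hltF.imp_of_mem ?_
        intro a b ha hb hab
        exact Prod.Lex.toLex_lt_toLex.mpr (by simp [hmemF a ha, hmemF b hb, hab])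
      · intro a ha b hb
        simp only [List.mem_singleton] at hb
        subst hb
        exact Prod.Lex.toLex_lt_toLex.mpr (by simp [hmemF a ha, hx1])
  · simp only [hany, Bool.false_eq_true, if_false]
    have hf : data.any (fun kv => kv.1 == "signature") = false :=
      Bool.eq_false_iff.mpr hany
    have hall : data.filter (fun kv => !(kv.1 == "signature")) = data := by
      rw [List.filter_eq_self]
      intro a ha
      simpa using List.any_eq_false.mp hf a ha
    rw [hall] at hltF hpermF hmemF ⊢
    refine (PySem.List.sorted_eq_of_perm_of_pairwise_lt data _
      (fun kv => toLex ((kv.1 == "signature"), kv.1)) hpermF ?_).symm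
    refine hltF.imp_of_mem ?_
    intro a b ha hb hab
    exact Prod.Lex.toLex_lt_toLex.mpr (by simp [hmemF a ha, hmemF b hb, hab])
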